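-- pv_equiv track=rewrite | github.com/castle-joooun/algorithm_python | dongbin/예전/기출/06.py | food_mekbang
-- ===== SOURCE A (Python) =====
-- def food_mekbang(foods, k):
--     time = 0
--     index = 0
--     food = 0
--
--     while time != k:
--         while True:
--             if foods[index] == 0:
--                 index += 1
--                 continue
--             else:
--                 foods[index] -= 1
--                 index += 1
--                 break
--
--         time += 1
--
--         if index == len(foods):
--             index = 0
--         food = index
--
--     return food + 1
-- ===== SOURCE B (Python) =====
-- def food_mekbang(foods, k):
--     # Pass-at-a-time simulation instead of unit-by-unit pointer stepping.
--     # Does not mutate its argument (A decrements `foods` in place).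
--     if k <= 0:
--         return 1
--     n = len(foods)
--     rem = list(foods)
--     while True:
--         pos = [i for i in range(n) if rem[i] != 0]
--         if not pos:
--             return 1  # no food left; unreachable on inputs where A returns
--         if k <= len(pos):
--             return (pos[k - 1] + 1) % n + 1
--         k -= len(pos)
--         rem = [v - 1 if v != 0 else v for v in rem]
-- ===== Notes on version B (the rewrite author's own statement) =====
-- stated objective: alternative
-- what changed: B simulates a whole round per iteration (collect the plates that still have food, compare k with their count, answer by direct indexing and modular arithmetic, decrement all of them at once) instead of A's unit-by-unit pointer stepping with in-place mutation and manual wraparound; B also does not mutate the input list.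
import Mathlib
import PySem

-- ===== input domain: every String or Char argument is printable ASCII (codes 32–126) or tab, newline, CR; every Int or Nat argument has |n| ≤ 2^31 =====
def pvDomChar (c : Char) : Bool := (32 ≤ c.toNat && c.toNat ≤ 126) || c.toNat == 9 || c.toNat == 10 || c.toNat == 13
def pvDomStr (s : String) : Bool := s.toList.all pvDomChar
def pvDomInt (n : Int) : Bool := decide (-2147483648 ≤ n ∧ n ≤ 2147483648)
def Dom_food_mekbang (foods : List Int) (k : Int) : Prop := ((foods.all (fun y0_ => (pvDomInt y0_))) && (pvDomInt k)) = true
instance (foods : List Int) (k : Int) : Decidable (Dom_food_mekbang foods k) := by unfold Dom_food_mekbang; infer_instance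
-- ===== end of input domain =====

-- B replaces A's unit-by-unit pointer stepping with a round-at-a-time simulation; equivalence is about
-- the RETURN value only (Python A decrements `foods` in place, B leaves its argument untouched).

-- ===== PORT A =====
-- inner `while True` scan: skip zeros, eat one unit at the first nonzero index;
-- none = IndexError (scan ran past the end) or fuel exhaustion (fuel `length+1` always suffices)
def eatScan : Nat → List Int → Int → Option (List Int × Int)
  | 0, _, _ => none
  | fuel+1, foods, index =>
    match PySem.List.pyGet? foods index with
    | none => none
    | some v =>
      if v = 0 then eatScan fuel foods (index + 1)
      else some (foods.set index.toNat (v - 1), index + 1)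

-- outer `while time != k` loop; on IndexError/fuel exhaustion returns `food + 1` (junk outside Pre_)
def eatOuter : Nat → List Int → Int → Int → Int → Int → Int
  | 0, _, _, _, _, food => food + 1
  | fuel+1, foods, k, time, index, food =>
    if time = k then food + 1
    else
      match eatScan (foods.length + 1) foods index with
      | none => food + 1
      | some (foods', index') =>
        let index2 := if index' = (foods'.length : Int) then 0 else index'
        eatOuter fuel foods' k (time + 1) index2 index2

def food_mekbang (foods : List Int) (k : Int) : Int :=
  eatOuter (k.toNat + 1) foods k 0 0 0

-- ===== PORT B =====
-- pos = [i for i in range(n) if rem[i] != 0]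
def bPos (rem : List Int) : List Nat :=
  (List.range rem.length).filter (fun i => decide (rem.getD i 0 ≠ 0))

-- rem = [v - 1 if v != 0 else v for v in rem]
def bDec (rem : List Int) : List Int :=
  rem.map (fun v => if v ≠ 0 then v - 1 else v)

-- `while True` loop of B; fuel k.toNat suffices since k drops by ≥ 1 per round
def bLoop : Nat → List Int → Int → Int → Int
  | 0, _, _, _ => 1
  | fuel+1, rem, n, k =>
    let pos := bPos rem
    if pos = [] then 1
    else if k ≤ (pos.length : Int) then
      PySem.Int.mod ((pos.getD (k - 1).toNat 0 : Int) + 1) n + 1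
    else bLoop fuel (bDec rem) n (k - pos.length)

def food_mekbang_alt (foods : List Int) (k : Int) : Int :=
  if k ≤ 0 then 1
  else bLoop k.toNat foods (foods.length : Int) k

-- ===== PRECONDITION & SPEC =====
-- `eBound foods` is the number of units A manages to eat before its scan runs off the end
-- (a plate with a negative count never reaches 0, hence is never exhausted).
def eBound (foods : List Int) : Int :=
  (foods.map (fun v => if v < 0 then foods.getLast! + 1 else min v (foods.getLast! + 1))).sum

-- Exactly the inputs on which Python A returns: for k < 0 A never terminates, and for
-- k ≥ 1 it raises IndexError on the empty list and whenever k exceeds eBound (unless the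
-- last plate is bottomless, i.e. negative).
def Pre_food_mekbang (foods : List Int) (k : Int) : Prop :=
  0 ≤ k ∧ (k = 0 ∨ (foods ≠ [] ∧ (foods.getLast! < 0 ∨ k ≤ eBound foods)))
instance (foods : List Int) (k : Int) : Decidable (Pre_food_mekbang foods k) := by
  unfold Pre_food_mekbang; infer_instance

def pvWitness_food_mekbang : List Int × Int := ([3, 1, 2], 4)

def Spec_food_mekbang (foods : List Int) (k : Int) (out : Int) : Prop := out = food_mekbang_alt foods k
instance (foods : List Int) (k : Int) (out : Int) : Decidable (Spec_food_mekbang foods k out) := by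
  unfold Spec_food_mekbang; infer_instance

-- ===== CLAIM (what is proved, stated in full; the proofs are below) =====
def Claim_equal_food_mekbang : Prop := ∀ (foods : List Int) (k : Int), Dom_food_mekbang foods k → Pre_food_mekbang foods k → Spec_food_mekbang foods k (food_mekbang foods k)

-- ===== LEMMAS AND PROOFS =====

-- first index q ≥ i with foods[q] ≠ 0
def firstNZ (foods : List Int) (i : Nat) : Option Nat :=
  if h : i < foods.length then
    if foods.getD i 0 ≠ 0 then some i else firstNZ foods (i + 1)
  else none
termination_by foods.length - i

-- per-eat reference: A's loop with the scan collapsed; `food` is A's running `food` variable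
def cRef : Nat → List Int → Nat → Int → Int
  | 0, _, _, food => food + 1
  | t+1, foods, i, food =>
    match firstNZ foods i with
    | none => food + 1
    | some q =>
      let foods' := foods.set q (foods.getD q 0 - 1)
      let i2 : Nat := if q + 1 = foods.length then 0 else q + 1
      if t = 0 then (i2 : Int) + 1
      else cRef t foods' i2 (i2 : Int)

-- plates ≥ i that still hold food
def posFrom (foods : List Int) (i : Nat) : List Nat :=
  (List.range' i (foods.length - i)).filter (fun q => decide (foods.getD q 0 ≠ 0))

-- one unit eaten from every nonzero plate at position ≥ i
def decFrom (foods : List Int) (i : Nat) : List Int :=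
  foods.mapIdx (fun j v => if i ≤ j ∧ v ≠ 0 then v - 1 else v)

def PassInv (rem : List Int) (t : Nat) : Prop :=
  rem ≠ [] ∧ 1 ≤ t ∧ (rem.getLast! < 0 ∨ (t : Int) ≤ eBound rem)

lemma firstNZ_out (foods : List Int) (i : Nat) (h : ¬ i < foods.length) :
    firstNZ foods i = none := by
  unfold firstNZ; simp [h]

lemma firstNZ_zero (foods : List Int) (i : Nat) (h : i < foods.length)
    (hz : foods.getD i 0 = 0) : firstNZ foods i = firstNZ foods (i + 1) := by
  rw [firstNZ, dif_pos h, if_neg (by simpa using hz)]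

lemma firstNZ_nz (foods : List Int) (i : Nat) (h : i < foods.length)
    (hz : foods.getD i 0 ≠ 0) : firstNZ foods i = some i := by
  rw [firstNZ, dif_pos h, if_pos hz]

lemma firstNZ_spec (foods : List Int) : ∀ (i q : Nat), firstNZ foods i = some q →
    i ≤ q ∧ q < foods.length ∧ foods.getD q 0 ≠ 0 := by
  intro i
  induction' hd : foods.length - i with d ih generalizing i
  · intro q hq
    rw [firstNZ_out foods i (by omega)] at hq
    exact absurd hq (by simp)
  · intro q hq
    by_cases hi : i < foods.length
    · by_cases hz : foods.getD i 0 = 0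
      · rw [firstNZ_zero foods i hi hz] at hq
        obtain ⟨h1, h2, h3⟩ := ih (i + 1) (by omega) q hq
        exact ⟨by omega, h2, h3⟩
      · rw [firstNZ_nz foods i hi hz] at hq
        obtain rfl : i = q := by simpa using hq
        exact ⟨le_refl _, hi, hz⟩
    · rw [firstNZ_out foods i hi] at hq
      exact absurd hq (by simp)

lemma eatScan_eq (d : Nat) : ∀ (foods : List Int) (i : Int), 0 ≤ i →
    foods.length + 1 - i.toNat ≤ d →
    eatScan d foods i =
      (firstNZ foods i.toNat).map (fun q => (foods.set q (foods.getD q 0 - 1), (q : Int) + 1)) := by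
  induction d with
  | zero =>
    intro foods i hi hb
    rw [firstNZ_out foods i.toNat (by omega)]
    simp [eatScan]
  | succ d ih =>
    intro foods i hi hb
    show eatScan (d + 1) foods i = _
    rw [eatScan, PySem.List.pyGet?_of_nonneg foods hi]
    by_cases hlt : i.toNat < foods.length
    · rw [List.getElem?_eq_getElem hlt]
      have hg : foods.getD i.toNat 0 = foods[i.toNat] := List.getD_eq_getElem foods 0 hlt
      by_cases hz : foods[i.toNat] = 0
      · rw [firstNZ_zero foods i.toNat hlt (by omega)]
        have := ih foods (i + 1) (by omega) (by omega)
        rw [show (i + 1).toNat = i.toNat + 1 by omega] at this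
        simpa [hz] using this
      · rw [firstNZ_nz foods i.toNat hlt (by omega)]
        simp [hz, List.getElem?_eq_getElem hlt, Int.toNat_of_nonneg hi]
    · rw [List.getElem?_eq_none (by omega), firstNZ_out foods i.toNat hlt]
      simp

lemma outer_eq_cRef (t : Nat) : ∀ (fuel : Nat), t + 1 ≤ fuel →
    ∀ (foods : List Int) (k time i food : Int), 0 ≤ i → k = time + t →
    eatOuter fuel foods k time i food = cRef t foods i.toNat food := by
  induction t with
  | zero =>
    intro fuel hf foods k time i food hi hk
    obtain ⟨f, rfl⟩ : ∃ f, fuel = f + 1 := ⟨fuel - 1, by omega⟩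
    simp at hk
    simp [eatOuter, hk, cRef]
  | succ t ih =>
    intro fuel hf foods k time i food hi hk
    obtain ⟨f, rfl⟩ : ∃ f, fuel = f + 1 := ⟨fuel - 1, by omega⟩
    have hne : ¬ time = k := by omega
    rw [eatOuter, if_neg hne,
      eatScan_eq (foods.length + 1) foods i hi (by omega)]
    rcases hq : firstNZ foods i.toNat with _ | q
    · simp [cRef, hq]
    · obtain ⟨hiq, hql, hqnz⟩ := firstNZ_spec foods i.toNat q hq
      rw [cRef]
      simp only [hq, Option.map_some]
      set foods' := foods.set q (foods.getD q 0 - 1) with hfoods'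
      have hlen : foods'.length = foods.length := by simp [hfoods']
      have hcast : ((q : Int) + 1 = (foods'.length : Int)) ↔ (q + 1 = foods.length) := by
        rw [hlen]; omega
      set i2n : Nat := if q + 1 = foods.length then 0 else q + 1 with hi2n
      have h2 : (if (q : Int) + 1 = (foods'.length : Int) then (0 : Int) else (q : Int) + 1)
          = (i2n : Int) := by
        by_cases hc : q + 1 = foods.length
        · rw [if_pos (hcast.mpr hc), hi2n, if_pos hc]; simp
        · rw [if_neg (fun h => hc (hcast.mp h)), hi2n, if_neg hc]; push_cast; ring
      simp only [h2]
      have := ih f (by omega) foods' k (time + 1) (i2n : Int) (i2n : Int) (by positivity)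
        (by omega)
      rw [this, Int.toNat_natCast]
      cases t with
      | zero => simp [cRef]
      | succ t' => simp

lemma posFrom_out (foods : List Int) (i : Nat) (h : foods.length ≤ i) :
    posFrom foods i = [] := by
  unfold posFrom; rw [show foods.length - i = 0 by omega]; simp

lemma posFrom_step (foods : List Int) (i : Nat) (h : i < foods.length) :
    posFrom foods i =
      if foods.getD i 0 ≠ 0 then i :: posFrom foods (i + 1) else posFrom foods (i + 1) := by
  unfold posFrom
  rw [show foods.length - i = (foods.length - (i + 1)) + 1 by omega, List.range'_succ,
    List.filter_cons]
  by_cases hz : foods.getD i 0 = 0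
  · rw [List.getD_eq_getElem?_getD] at hz; simp [hz]
  · rw [List.getD_eq_getElem?_getD] at hz; simp [hz]

lemma mem_posFrom (foods : List Int) (i q : Nat) :
    q ∈ posFrom foods i ↔ i ≤ q ∧ q < foods.length ∧ foods.getD q 0 ≠ 0 := by
  unfold posFrom
  simp only [List.mem_filter, List.mem_range'_1, decide_eq_true_eq]
  constructor
  · rintro ⟨⟨h1, h2⟩, h3⟩; exact ⟨h1, by omega, h3⟩
  · rintro ⟨h1, h2, h3⟩; exact ⟨⟨h1, by omega⟩, h3⟩

lemma posFrom_set_high (foods : List Int) (i : Nat) (x : Int) :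
    posFrom (foods.set i x) (i + 1) = posFrom foods (i + 1) := by
  unfold posFrom
  rw [List.length_set]
  apply List.filter_congr
  intro q hq
  rw [List.mem_range'_1] at hq
  have hne : i ≠ q := by omega
  rw [List.getD_eq_getElem?_getD, List.getD_eq_getElem?_getD, List.getElem?_set_ne hne]

lemma posFrom_zero (rem : List Int) : posFrom rem 0 = bPos rem := by
  unfold posFrom bPos
  rw [List.range_eq_range', Nat.sub_zero]

lemma decFrom_ge (foods : List Int) (i : Nat) (h : foods.length ≤ i) :
    decFrom foods i = foods := by
  apply List.ext_getElem (by simp [decFrom])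
  intro n h1 h2
  simp only [decFrom, List.getElem_mapIdx]
  rw [if_neg]; rintro ⟨hle, -⟩; omega

lemma decFrom_zero_step (foods : List Int) (i : Nat) (h : i < foods.length)
    (hz : foods.getD i 0 = 0) : decFrom foods i = decFrom foods (i + 1) := by
  have hzi : foods[i] = 0 := by rwa [List.getD_eq_getElem foods 0 h] at hz
  apply List.ext_getElem (by simp [decFrom])
  intro n h1 h2
  simp only [decFrom, List.getElem_mapIdx]
  by_cases hn : n = i
  · subst hn; simp [hzi]
  · by_cases hle : i + 1 ≤ n
    · split_ifs with c1 c2 <;> omega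
    · split_ifs with c1 c2 <;> omega

lemma decFrom_set_step (foods : List Int) (i : Nat) (h : i < foods.length)
    (hz : foods.getD i 0 ≠ 0) :
    decFrom foods i = decFrom (foods.set i (foods.getD i 0 - 1)) (i + 1) := by
  have hg : foods.getD i 0 = foods[i] := List.getD_eq_getElem foods 0 h
  apply List.ext_getElem (by simp [decFrom])
  intro n h1 h2
  simp only [decFrom, List.getElem_mapIdx, List.getElem_set]
  by_cases hn : i = n
  · subst hn
    rw [if_pos rfl, if_pos ⟨le_refl i, by omega⟩, if_neg (by rintro ⟨hle, -⟩; omega), hg]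
  · rw [if_neg hn]
    split_ifs with c1 c2 <;> omega

lemma decFrom_zero (rem : List Int) : decFrom rem 0 = bDec rem := by
  apply List.ext_getElem (by simp [decFrom, bDec])
  intro n h1 h2
  simp [decFrom, bDec, List.getElem_mapIdx]

lemma mod_formula (q n : Nat) (h : q < n) :
    PySem.Int.mod ((q : Int) + 1) (n : Int) = if q + 1 = n then 0 else (q : Int) + 1 := by
  rw [PySem.Int.mod_eq_emod_of_pos (by omega : (0 : Int) < (n : Int))]
  by_cases hc : q + 1 = n
  · rw [if_pos hc, show ((q : Int) + 1) = (n : Int) by omega, Int.emod_self]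
  · rw [if_neg hc]
    exact Int.emod_eq_of_lt (by omega) (by omega)

lemma pass_a (d : Nat) : ∀ (foods : List Int) (i t : Nat) (food : Int),
    foods.length - i ≤ d → 1 ≤ t → t ≤ (posFrom foods i).length →
    cRef t foods i food =
      PySem.Int.mod (((posFrom foods i).getD (t - 1) 0 : Int) + 1) (foods.length : Int) + 1 := by
  induction d with
  | zero =>
    intro foods i t food hd ht hlen
    rw [posFrom_out foods i (by omega)] at hlen
    simp at hlen; omega
  | succ d ih =>
    intro foods i t food hd ht hlen
    by_cases hi : i < foods.length
    · by_cases hz : foods.getD i 0 = 0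
      · have hp : posFrom foods i = posFrom foods (i + 1) := by
          rw [posFrom_step foods i hi, if_neg (by simpa using hz)]
        have hstep : cRef t foods i food = cRef t foods (i + 1) food := by
          obtain ⟨t', rfl⟩ : ∃ t', t = t' + 1 := ⟨t - 1, by omega⟩
          rw [cRef, cRef, firstNZ_zero foods i hi hz]
        rw [hp] at hlen ⊢
        rw [hstep]
        exact ih foods (i + 1) t food (by omega) ht hlen
      · have hp : posFrom foods i = i :: posFrom foods (i + 1) := by
          rw [posFrom_step foods i hi, if_pos hz]
        obtain ⟨t', rfl⟩ : ∃ t', t = t' + 1 := ⟨t - 1, by omega⟩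
        rw [cRef, firstNZ_nz foods i hi hz]
        simp only
        cases t' with
        | zero =>
          rw [hp]
          simp only [Nat.add_sub_cancel, List.getD_cons_zero]
          rw [mod_formula i foods.length hi]
          split_ifs with hc <;> push_cast <;> ring
        | succ t'' =>
          by_cases hend : i + 1 = foods.length
          · rw [hp, posFrom_out foods (i + 1) (by omega)] at hlen
            simp at hlen
          · rw [if_neg (by omega : ¬ t'' + 1 = 0), if_neg hend]
            have hlen' : (t'' + 1) ≤ (posFrom (foods.set i (foods.getD i 0 - 1)) (i + 1)).length := by
              rw [posFrom_set_high]
              rw [hp] at hlen; simpa using hlen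
            have := ih (foods.set i (foods.getD i 0 - 1)) (i + 1) (t'' + 1) ((i + 1 : Nat) : Int)
              (by simp; omega) (by omega) hlen'
            rw [this, posFrom_set_high, List.length_set, hp]
            simp
    · rw [posFrom_out foods i (by omega)] at hlen
      simp at hlen; omega

lemma pass_b (d : Nat) : ∀ (foods : List Int) (i t : Nat) (food : Int),
    foods.length - i ≤ d → (posFrom foods i).length < t → i < foods.length →
    foods.getD (foods.length - 1) 0 ≠ 0 →
    cRef t foods i food = cRef (t - (posFrom foods i).length) (decFrom foods i) 0 0 := by
  induction d with
  | zero =>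
    intro foods i t food hd hm hi hlast
    omega
  | succ d ih =>
    intro foods i t food hd hm hi hlast
    by_cases hz : foods.getD i 0 = 0
    · have hiend : i < foods.length - 1 := by
        rcases Nat.lt_or_ge i (foods.length - 1) with h | h
        · exact h
        · exfalso; exact hlast (by rw [show foods.length - 1 = i by omega]; exact hz)
      have hp : posFrom foods i = posFrom foods (i + 1) := by
        rw [posFrom_step foods i hi, if_neg (by simpa using hz)]
      have hstep : cRef t foods i food = cRef t foods (i + 1) food := by
        obtain ⟨t', rfl⟩ : ∃ t', t = t' + 1 := ⟨t - 1, by omega⟩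
        rw [cRef, cRef, firstNZ_zero foods i hi hz]
      rw [hstep, hp, decFrom_zero_step foods i hi hz]
      exact ih foods (i + 1) t food (by omega) (by rwa [hp] at hm) (by omega) hlast
    · have hp : posFrom foods i = i :: posFrom foods (i + 1) := by
        rw [posFrom_step foods i hi, if_pos hz]
      obtain ⟨t', rfl⟩ : ∃ t', t = t' + 1 := ⟨t - 1, by omega⟩
      have ht' : 1 ≤ t' := by
        rw [hp] at hm; simp at hm; omega
      rw [cRef, firstNZ_nz foods i hi hz]
      simp only [if_neg (by omega : ¬ t' = 0)]
      rw [decFrom_set_step foods i hi hz]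
      set foods' := foods.set i (foods.getD i 0 - 1) with hfoods'
      have hlen' : foods'.length = foods.length := by simp [hfoods']
      by_cases hend : i + 1 = foods.length
      · -- last plate of the round: the scan wraps, the round is over
        have hpe : posFrom foods (i + 1) = [] := posFrom_out foods (i + 1) (by omega)
        rw [if_pos (by omega : i + 1 = foods.length), hp, hpe]
        rw [decFrom_ge foods' (i + 1) (by omega)]
        simp
      · rw [if_neg (by omega : ¬ i + 1 = foods.length)]
        have hrec := ih foods' (i + 1) t' ((i + 1 : Nat) : Int) (by omega)
          (by rw [posFrom_set_high]; rw [hp] at hm; simp at hm; omega)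
          (by omega)
          (by rw [hlen']
              have : foods'.getD (foods.length - 1) 0 = foods.getD (foods.length - 1) 0 := by
                rw [List.getD_eq_getElem?_getD, List.getD_eq_getElem?_getD, hfoods',
                  List.getElem?_set_ne (by omega : i ≠ foods.length - 1)]
              rwa [this])
        rw [hrec, posFrom_set_high, hp]
        simp

lemma lastD (l : List Int) (h : l ≠ []) : l.getLast! = l.getD (l.length - 1) 0 := by
  rcases l with _ | ⟨a, as⟩
  · exact absurd rfl h
  · show (a :: as).getLast _ = _
    rw [List.getLast_eq_getElem, List.getD_eq_getElem?_getD,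
      List.getElem?_eq_getElem (by simp)]
    simp

lemma getD_bDec (rem : List Int) (q : Nat) (hq : q < rem.length) :
    (bDec rem).getD q 0 =
      if rem.getD q 0 ≠ 0 then rem.getD q 0 - 1 else rem.getD q 0 := by
  rw [List.getD_eq_getElem (bDec rem) 0 (by simpa [bDec] using hq),
    List.getD_eq_getElem rem 0 hq]
  simp [bDec]

lemma bPos_length (rem : List Int) :
    (bPos rem).length = rem.countP (fun v => decide (v ≠ 0)) := by
  induction rem with
  | nil => simp [bPos]
  | cons v tl ih =>
    unfold bPos at ih ⊢
    rw [List.length_cons, List.range_succ_eq_map, List.filter_cons, List.filter_map]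
    have hcomp : ((fun i => decide ((v :: tl).getD i 0 ≠ 0)) ∘ Nat.succ)
        = (fun i => decide (tl.getD i 0 ≠ 0)) := by
      funext i
      simp
    rw [hcomp, List.getD_cons_zero, List.countP_cons]
    by_cases hv : v = 0
    · rw [if_neg (by simp [hv]), List.length_map, ih]; simp [hv]
    · rw [if_pos (by simp [hv]), List.length_cons, List.length_map, ih]; simp [hv]

lemma eb_aux (l : List Int) (L : Int) (hL : 1 ≤ L) :
    (l.map (fun v => if v < 0 then L + 1 else min v (L + 1))).sum
      = ((l.map (fun v => if v ≠ 0 then v - 1 else v)).map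
          (fun v => if v < 0 then L else min v L)).sum
        + (l.countP (fun v => decide (v ≠ 0)) : Int) := by
  induction l with
  | nil => simp
  | cons v tl ih =>
    simp only [List.map_cons, List.sum_cons, List.countP_cons]
    push_cast
    rw [ih]
    have hhead : (if v < 0 then L + 1 else min v (L + 1))
        = (if (if v ≠ 0 then v - 1 else v) < 0 then L
            else min (if v ≠ 0 then v - 1 else v) L)
          + (if v ≠ 0 then (1 : Int) else 0) := by
      simp only [min_def]; split_ifs <;> omega
    rw [hhead]
    split_ifs <;> simp_all <;> ring

lemma eb_zero (l : List Int) :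
    (l.map (fun v => if v < 0 then (1 : Int) else min v 1)).sum
      = (l.countP (fun v => decide (v ≠ 0)) : Int) := by
  induction l with
  | nil => simp
  | cons v tl ih =>
    simp only [List.map_cons, List.sum_cons, List.countP_cons]
    push_cast
    rw [ih]
    have hhead : (if v < 0 then (1 : Int) else min v 1)
        = (if v ≠ 0 then (1 : Int) else 0) := by
      simp only [min_def]; split_ifs <;> omega
    rw [hhead]
    split_ifs <;> simp_all <;> ring

lemma inv_step (rem : List Int) (t : Nat) (h : PassInv rem t) (hm : (bPos rem).length < t) :
    rem.getD (rem.length - 1) 0 ≠ 0 ∧ PassInv (bDec rem) (t - (bPos rem).length) := by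
  obtain ⟨hne, ht, hdisj⟩ := h
  have hlen0 : 0 < rem.length := List.length_pos_iff.mpr hne
  have hlast : rem.getLast! = rem.getD (rem.length - 1) 0 := lastD rem hne
  have hbne : bDec rem ≠ [] := by
    simpa [bDec, List.map_eq_nil_iff] using hne
  have hblen : (bDec rem).length = rem.length := by simp [bDec]
  have hm1 : 1 ≤ t - (bPos rem).length := by omega
  have hdb : (bDec rem).getD (rem.length - 1) 0 =
      if rem.getD (rem.length - 1) 0 ≠ 0 then rem.getD (rem.length - 1) 0 - 1
      else rem.getD (rem.length - 1) 0 := getD_bDec rem _ (by omega)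
  have hlb : (bDec rem).getLast! = (bDec rem).getD (rem.length - 1) 0 := by
    rw [lastD _ hbne, hblen]
  have hnegcase : rem.getLast! < 0 →
      rem.getD (rem.length - 1) 0 ≠ 0 ∧ PassInv (bDec rem) (t - (bPos rem).length) := by
    intro hneg
    refine ⟨by omega, hbne, hm1, Or.inl ?_⟩
    rw [hlb, hdb, if_pos (by omega)]
    omega
  rcases hdisj with hneg | hE
  · exact hnegcase hneg
  · by_cases hneg : rem.getLast! < 0
    · exact hnegcase hneg
    · by_cases hL0 : rem.getLast! = 0
      · exfalso
        unfold eBound at hE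
        rw [hL0] at hE
        simp only [zero_add] at hE
        rw [eb_zero] at hE
        rw [bPos_length] at hm
        omega
      · have hL1 : 1 ≤ rem.getLast! := by omega
        refine ⟨by omega, hbne, hm1, Or.inr ?_⟩
        have hlast' : (bDec rem).getLast! = rem.getLast! - 1 := by
          rw [hlb, hdb, if_pos (by omega)]; omega
        unfold eBound
        rw [hlast']
        simp only [show rem.getLast! - 1 + 1 = rem.getLast! by ring]
        have haux := eb_aux rem rem.getLast! hL1
        unfold eBound at hE
        rw [haux] at hE
        rw [bPos_length] at hm
        rw [bPos_length]
        have hbd : bDec rem = rem.map (fun v => if v ≠ 0 then v - 1 else v) := rfl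
        rw [hbd]
        omega

lemma cRef_eq_bLoop (t : Nat) : ∀ (rem : List Int) (food : Int) (fuel : Nat), t ≤ fuel →
    PassInv rem t → cRef t rem 0 food = bLoop fuel rem (rem.length : Int) (t : Int) := by
  induction t using Nat.strong_induction_on with
  | _ t ih =>
    intro rem food fuel hf hinv
    obtain ⟨hne, ht1, hdisj⟩ := hinv
    have hlen0 : 0 < rem.length := List.length_pos_iff.mpr hne
    obtain ⟨f, rfl⟩ : ∃ f, fuel = f + 1 := ⟨fuel - 1, by omega⟩
    rw [bLoop]
    by_cases hcase : t ≤ (bPos rem).length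
    · have hnp : ¬ bPos rem = [] := by
        intro h0
        rw [h0] at hcase; simp at hcase; omega
      rw [if_neg hnp, if_pos (by exact_mod_cast hcase)]
      have ha := pass_a rem.length rem 0 t food (by omega) ht1
        (by rw [posFrom_zero]; exact hcase)
      rw [posFrom_zero] at ha
      rw [ha, show ((t : Int) - 1).toNat = t - 1 by omega]
    · rw [Nat.not_le] at hcase
      obtain ⟨hlastnz, hinv'⟩ := inv_step rem t ⟨hne, ht1, hdisj⟩ (by omega)
      have hnp : ¬ bPos rem = [] := by
        intro h0
        have hmem : rem.length - 1 ∈ posFrom rem 0 :=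
          (mem_posFrom rem 0 (rem.length - 1)).mpr ⟨Nat.zero_le _, by omega, hlastnz⟩
        rw [posFrom_zero, h0] at hmem
        simp at hmem
      have hm1 : 0 < (bPos rem).length := List.length_pos_iff.mpr hnp
      rw [if_neg hnp, if_neg (by omega)]
      have hb := pass_b rem.length rem 0 t food (by omega)
        (by rw [posFrom_zero]; omega) (by omega) hlastnz
      rw [posFrom_zero, decFrom_zero] at hb
      rw [hb]
      have hrec := ih (t - (bPos rem).length) (by omega) (bDec rem) 0 f (by omega) hinv'
      rw [hrec, show ((bDec rem).length : Int) = (rem.length : Int) by simp [bDec],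
        show ((t - (bPos rem).length : Nat) : Int) = (t : Int) - ((bPos rem).length : Int) by omega]

-- ===== VERDICT (by name: the statement is the Claim_ definition above) =====
theorem food_mekbang_spec : Claim_equal_food_mekbang := by
  intro foods k hdom hpre
  obtain ⟨hk0, hcase⟩ := hpre
  unfold Spec_food_mekbang food_mekbang food_mekbang_alt
  by_cases hk : k = 0
  · subst hk
    rw [if_pos (le_refl (0 : Int))]
    show eatOuter (0 + 1) foods 0 0 0 0 = 1
    rw [eatOuter]
    simp
  · have hk1 : 1 ≤ k := by omega
    rw [if_neg (by omega)]
    rcases hcase with rfl | ⟨hne, hdisj⟩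
    · exact absurd rfl hk
    · have ht : k = 0 + (k.toNat : Int) := by omega
      rw [outer_eq_cRef k.toNat (k.toNat + 1) (le_refl _) foods k 0 0 0 (le_refl 0) ht]
      have hinv : PassInv foods k.toNat := by
        refine ⟨hne, by omega, ?_⟩
        rcases hdisj with h | h
        · exact Or.inl h
        · exact Or.inr (by omega)
      have := cRef_eq_bLoop k.toNat foods 0 k.toNat (le_refl _) hinv
      rw [show (0 : Int).toNat = 0 by rfl, this, Int.toNat_of_nonneg hk0]
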